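-- pv_equiv track=rewrite | github.com/bgoonz/UsefulResourceRepo2.0 | MY_REPOS/DATA_STRUC_PYTHON_NOTES/python-prac/leetcode/Compare_strings_frequency.py | numSmallerByFrequency
-- ===== SOURCE A (Python) =====
-- import bisect
-- import collections
--
-- def numSmallerByFrequency(queries, words):
--
--     # you have to go through each char to find the frequency O(n)
--     def f(s):
--         return collections.Counter(s)[min(s)]
--
--     # O(m)
--     arr_w = []
--     for word in words:
--         arr_w.append(f(word))
--
--     # O(n log(n))
--     arr_w.sort()
--
--     arr_ans = []
--
--     # O(log n)
--     for query in queries: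
--         fq = f(query)
--         idx = bisect.bisect(arr_w, fq)
--         arr_ans.append(len(arr_w[idx:]))
--
--         # counter = 0
--         # for val in arr_w:
--         #     if val > fq:
--         #         counter += 1
--         #     else:
--         #         break
--         # arr_ans.append(counter)
--     return arr_ans
-- ===== SOURCE B (Python) =====
-- import collections
--
-- def numSmallerByFrequency(queries, words):
--     # frequency of the lexicographically smallest character
--     def f(s):
--         m = min(s)
--         return sum(1 for ch in s if ch == m)
--
--     cnt = collections.Counter(f(w) for w in words)
--     return [sum(c for v, c in cnt.items() if v > f(q)) for q in queries]
-- ===== Notes on version B (the rewrite author's own statement) =====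
-- stated objective: faster
-- what changed: B replaces A's sort + per-query bisect + O(n) slice copy with a Counter of the words' min-char frequencies built once and a per-query sum over its few distinct entries.
import Mathlib
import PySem

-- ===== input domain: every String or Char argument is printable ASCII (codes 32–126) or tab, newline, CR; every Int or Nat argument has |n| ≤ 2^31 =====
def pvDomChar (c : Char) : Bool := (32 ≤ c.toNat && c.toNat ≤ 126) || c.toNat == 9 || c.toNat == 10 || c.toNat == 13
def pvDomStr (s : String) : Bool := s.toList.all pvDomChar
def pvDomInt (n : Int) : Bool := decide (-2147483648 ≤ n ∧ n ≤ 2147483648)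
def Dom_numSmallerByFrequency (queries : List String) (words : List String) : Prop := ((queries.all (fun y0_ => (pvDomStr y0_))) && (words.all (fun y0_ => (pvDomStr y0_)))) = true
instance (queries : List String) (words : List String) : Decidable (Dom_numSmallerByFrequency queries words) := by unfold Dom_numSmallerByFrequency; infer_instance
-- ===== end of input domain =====

-- B builds a Counter of the words' min-char frequencies once and answers each query by summing
-- the counts of the entries above the query's frequency, instead of A's sort + bisect + slice copy.

-- ===== PORT A =====
-- f(s) = collections.Counter(s)[min(s)]; min('') raises ValueError (excluded by Pre_), the none branch is a totality guard
def pvfA (s : String) : Int :=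
  match PySem.List.min? s.toList (fun c => c) with
  | some m => (PySem.Dict.counter s.toList).getD m 0
  | none => 0

def numSmallerByFrequency (queries : List String) (words : List String) : List Int :=
  let arr_w := words.foldl (fun acc word => acc ++ [pvfA word]) []
  let arr_w := PySem.List.sorted arr_w (fun x => x) false
  queries.foldl (fun arr_ans query =>
    let fq := pvfA query
    let idx := PySem.List.bisectRight arr_w fq
    arr_ans ++ [((PySem.List.slice arr_w (some (idx : Int)) none).length : Int)]) []

-- ===== PORT B =====
-- f(s): m = min(s); sum(1 for ch in s if ch == m); min('') raises (excluded by Pre_)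
def pvfB (s : String) : Int :=
  match PySem.List.min? s.toList (fun c => c) with
  | some m => s.toList.foldl (fun acc ch => if ch == m then acc + 1 else acc) 0
  | none => 0

def numSmallerByFrequency_alt (queries : List String) (words : List String) : List Int :=
  let cnt := PySem.Dict.counter (words.map (fun w => pvfB w))
  queries.map (fun q =>
    let fq := pvfB q
    cnt.items.foldl (fun acc p => if fq < p.1 then acc + p.2 else acc) 0)

-- ===== PRECONDITION & SPEC =====
-- Pre_ excludes inputs containing an empty string, on which Python's min('') raises ValueError in both A and B.
def Pre_numSmallerByFrequency (queries : List String) (words : List String) : Prop :=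
  (∀ q ∈ queries, q ≠ "") ∧ (∀ w ∈ words, w ≠ "")
instance (queries : List String) (words : List String) : Decidable (Pre_numSmallerByFrequency queries words) := by unfold Pre_numSmallerByFrequency; infer_instance
def pvWitness_numSmallerByFrequency : List String × List String := (["bbb", "cc"], ["a", "aab", "zz"])

def Spec_numSmallerByFrequency (queries : List String) (words : List String) (out : List Int) : Prop := out = numSmallerByFrequency_alt queries words
instance (queries : List String) (words : List String) (out : List Int) : Decidable (Spec_numSmallerByFrequency queries words out) := by unfold Spec_numSmallerByFrequency; infer_instance

-- ===== CLAIM (what is proved, stated in full; the proofs are below) =====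
def Claim_equal_numSmallerByFrequency : Prop := ∀ (queries : List String) (words : List String), Dom_numSmallerByFrequency queries words → Pre_numSmallerByFrequency queries words → Spec_numSmallerByFrequency queries words (numSmallerByFrequency queries words)

-- ===== LEMMAS AND PROOFS =====

-- the two f helpers agree (on every string: both guard '' with 0)
theorem pvfA_eq_pvfB (s : String) : pvfA s = pvfB s := by
  unfold pvfA pvfB
  cases h : PySem.List.min? s.toList (fun c => c) with
  | none => rfl
  | some m =>
      dsimp only
      rw [PySem.List.foldl_beq_add_one s.toList m 0, PySem.Dict.getD_counter]
      ring

-- over a nodup list containing a, the p-guarded indicator of a sums to the indicator of a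
theorem sum_indicator_nodup (p : Int → Bool) (a : Int) :
    ∀ ks : List Int, ks.Nodup → a ∈ ks →
    (ks.map (fun k => if p k then (if k = a then (1:Int) else 0) else 0)).sum
      = if p a then (1:Int) else 0 := by
  intro ks
  induction ks with
  | nil => intro _ h; cases h
  | cons b bs ih =>
      intro hnd ha
      simp only [List.map_cons, List.sum_cons]
      rcases List.mem_cons.mp ha with hba | hin
      · subst hba
        have hz : (bs.map (fun k => if p k then (if k = a then (1:Int) else 0) else 0)).sum = 0 := by
          apply List.sum_eq_zero
          intro x hx
          rcases List.mem_map.mp hx with ⟨k, hk, rfl⟩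
          have hne : k ≠ a := fun h => (List.nodup_cons.mp hnd).1 (h ▸ hk)
          simp [hne]
        rw [hz]
        simp
      · have hba : b ≠ a := fun h => (List.nodup_cons.mp hnd).1 (h ▸ hin)
        rw [ih (List.nodup_cons.mp hnd).2 hin]
        simp [hba]

-- summing count k l over a nodup superset ks of l's elements, filtered by p, counts l's p-elements
theorem sum_ite_count (p : Int → Bool) (l : List Int) :
    ∀ ks : List Int, ks.Nodup → (∀ x ∈ l, x ∈ ks) →
    (ks.map (fun k => if p k then (l.count k : Int) else 0)).sum = (l.countP p : Int) := by
  induction l with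
  | nil =>
      intro ks _ _
      simp
  | cons a t ih =>
      intro ks hnd hmem
      have hcnt : ∀ k : Int, ((a :: t).count k : Int) = (t.count k : Int) + (if k = a then 1 else 0) := by
        intro k
        simp only [List.count_cons, beq_iff_eq]
        split_ifs with h1 h2 h2 <;> push_cast <;> omega
      have h1 : (ks.map (fun k => if p k then ((a :: t).count k : Int) else 0)).sum
          = (ks.map (fun k => (if p k then (t.count k : Int) else 0)
              + (if p k then (if k = a then 1 else 0) else 0))).sum := by
        congr 1
        apply List.map_congr_left
        intro k _
        rw [hcnt k]
        split_ifs <;> ring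
      rw [h1, PySem.List.sum_map_add_int,
          sum_indicator_nodup p a ks hnd (hmem a (by simp)),
          ih ks hnd (fun x hx => hmem x (by simp [hx])), List.countP_cons]
      by_cases hp : p a <;> simp [hp]

-- A's per-query value on the sorted list is the count of frequencies above fq
theorem a_query_count (fws : List Int) (fq : Int) :
    (((PySem.List.slice (PySem.List.sorted fws (fun x => x) false)
        (some ((PySem.List.bisectRight (PySem.List.sorted fws (fun x => x) false) fq : Nat) : Int)) none).length : Int))
      = (fws.countP (fun v => fq < v) : Int) := by
  set arr := PySem.List.sorted fws (fun x => x) false with harr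
  have hpw : arr.Pairwise (fun a b => a ≤ b) := by
    have := PySem.List.sorted_pairwise fws (fun x => x)
    simpa [harr] using this
  obtain ⟨hle, hbefore, hafter⟩ := PySem.List.bisectRight_spec arr fq hpw
  set idx := PySem.List.bisectRight arr fq with hidx
  rw [PySem.List.slice_from arr (by positivity)]
  simp only [Int.toNat_natCast]
  have hdropall : (arr.drop idx).countP (fun v => decide (fq < v)) = (arr.drop idx).length := by
    rw [List.countP_eq_length]
    intro a ha
    rcases List.mem_iff_getElem.mp ha with ⟨j, hj, rfl⟩
    rw [List.length_drop] at hj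
    rw [List.getElem_drop]
    exact decide_eq_true (hafter (idx + j) (by omega) (by omega))
  have htake : (arr.take idx).countP (fun v => decide (fq < v)) = 0 := by
    rw [List.countP_eq_zero]
    intro a ha
    rcases List.mem_iff_getElem.mp ha with ⟨j, hj, rfl⟩
    rw [List.length_take] at hj
    rw [List.getElem_take]
    have := hbefore j (by omega) (by omega)
    simp only [decide_eq_true_eq]
    omega
  have hperm : arr.Perm fws := PySem.List.sorted_perm fws (fun x => x) false
  have hsplit : arr.countP (fun v => decide (fq < v)) = (arr.drop idx).length := by
    conv_lhs => rw [← List.take_append_drop idx arr]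
    rw [List.countP_append, htake, hdropall, Nat.zero_add]
  rw [List.length_drop] at hsplit
  have hpc := List.Perm.countP_eq (fun v => decide (fq < v)) hperm
  rw [List.length_drop]
  omega

-- B's per-query value is the same count
theorem b_query_count (fws : List Int) (fq : Int) :
    ((PySem.Dict.counter fws).items.foldl (fun acc p => if fq < p.1 then acc + p.2 else acc) 0)
      = (fws.countP (fun v => fq < v) : Int) := by
  have hfun : (fun (acc : Int) (p : Int × Int) => if fq < p.1 then acc + p.2 else acc)
      = (fun acc p => acc + (if fq < p.1 then p.2 else 0)) := by
    funext acc p; split_ifs <;> ring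
  rw [hfun, PySem.List.foldl_add, PySem.Dict.items_counter, List.map_map]
  have hcomp : ((fun p : Int × Int => if fq < p.1 then p.2 else 0) ∘ fun k => (k, (fws.count k : Int)))
      = (fun k => if (fun v => decide (fq < v)) k then (fws.count k : Int) else 0) := by
    funext k; simp
  rw [hcomp, sum_ite_count (fun v => decide (fq < v)) fws (PySem.Set.ofList fws)
      (PySem.Set.nodup_ofList fws) (fun x hx => (PySem.Set.mem_ofList fws x).mpr hx)]
  ring

-- ===== VERDICT (by name: the statement is the Claim_ definition above) =====
theorem numSmallerByFrequency_spec : Claim_equal_numSmallerByFrequency := by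
  intro queries words _ _
  unfold Spec_numSmallerByFrequency numSmallerByFrequency numSmallerByFrequency_alt
  simp only [PySem.List.foldl_append_singleton_eq_map, List.nil_append]
  have hf : words.map (fun w => pvfB w) = words.map pvfA := by
    apply List.map_congr_left; intro w _; exact (pvfA_eq_pvfB w).symm
  rw [hf]
  apply List.map_congr_left
  intro q _
  rw [← pvfA_eq_pvfB q, a_query_count (words.map pvfA) (pvfA q), b_query_count (words.map pvfA) (pvfA q)]
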